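-- pv_equiv track=rewrite | github.com/katnissmin/CS1301 | HW09.py | poncePlanner
-- ===== SOURCE A (Python) =====
-- def poncePlanner(restaurantChoice):
--     adict = {}
--     if len(restaurantChoice) == 0:
--         return adict
--     else:
--         adict = poncePlanner(restaurantChoice[1:])
--         if restaurantChoice[0][0] not in adict.keys():
--             adict[restaurantChoice[0][0]] = restaurantChoice[0][1]
--     return adict
-- ===== SOURCE B (Python) =====
-- def poncePlanner(restaurantChoice):
--     adict = {}
--     for pair in reversed(restaurantChoice):
--         if pair[0] not in adict:
--             adict[pair[0]] = pair[1]
--     return adict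
-- ===== Notes on version B (the rewrite author's own statement) =====
-- stated objective: simpler
-- what changed: Replaces the tail recursion (recurse on the tail, then insert the head if absent) with a single iterative first-wins pass over the reversed list, building the dict in one loop without any recursion or list slicing.
import Mathlib
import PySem

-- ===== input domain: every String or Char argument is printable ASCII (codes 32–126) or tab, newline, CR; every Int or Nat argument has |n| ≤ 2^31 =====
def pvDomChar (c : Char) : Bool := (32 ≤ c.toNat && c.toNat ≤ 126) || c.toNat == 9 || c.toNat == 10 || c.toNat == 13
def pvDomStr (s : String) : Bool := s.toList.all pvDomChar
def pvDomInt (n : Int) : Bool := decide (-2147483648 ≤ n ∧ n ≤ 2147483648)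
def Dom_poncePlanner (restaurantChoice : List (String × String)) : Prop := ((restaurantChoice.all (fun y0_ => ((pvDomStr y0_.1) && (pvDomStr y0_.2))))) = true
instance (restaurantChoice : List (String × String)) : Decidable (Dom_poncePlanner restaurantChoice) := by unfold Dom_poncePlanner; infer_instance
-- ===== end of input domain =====

-- B replaces A's tail recursion with one iterative first-wins pass over the reversed list (simpler; return value only).

-- ===== PORT A =====
-- A: if empty return {}; else adict = poncePlanner(rest); insert head key if absent.
def poncePlannerDict (restaurantChoice : List (String × String)) : PySem.Dict String String :=
  match restaurantChoice with
  | [] => PySem.Dict.empty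
  | p :: rest =>
    let adict := poncePlannerDict rest
    if adict.contains p.1 then adict else adict.insert p.1 p.2  -- 'not in adict.keys()'

def poncePlanner (restaurantChoice : List (String × String)) : List (String × String) :=
  (poncePlannerDict restaurantChoice).items

-- ===== PORT B =====
-- B: iterative loop over reversed(restaurantChoice), first occurrence (in that order) wins.
def poncePlanner_alt (restaurantChoice : List (String × String)) : List (String × String) :=
  (restaurantChoice.reverse.foldl
    (fun adict pair => if adict.contains pair.1 then adict else adict.insert pair.1 pair.2)
    PySem.Dict.empty).items

-- ===== PRECONDITION & SPEC =====
def Spec_poncePlanner (restaurantChoice : List (String × String)) (out : List (String × String)) : Prop := out = poncePlanner_alt restaurantChoice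
instance (restaurantChoice : List (String × String)) (out : List (String × String)) : Decidable (Spec_poncePlanner restaurantChoice out) := by unfold Spec_poncePlanner; infer_instance

-- ===== CLAIM (what is proved, stated in full; the proofs are below) =====
def Claim_equal_poncePlanner : Prop := ∀ (restaurantChoice : List (String × String)), Dom_poncePlanner restaurantChoice → Spec_poncePlanner restaurantChoice (poncePlanner restaurantChoice)

-- ===== LEMMAS AND PROOFS =====
-- A's recursion is the foldr of the same step function; B's loop is the foldl over the reversed list.
theorem poncePlannerDict_eq_foldr (l : List (String × String)) :
    poncePlannerDict l =
      l.foldr (fun p adict =>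
        if adict.contains p.1 then adict else adict.insert p.1 p.2) PySem.Dict.empty := by
  induction l with
  | nil => rfl
  | cons p rest ih =>
    simp only [poncePlannerDict, List.foldr, ih]

-- ===== VERDICT (by name: the statement is the Claim_ definition above) =====
theorem poncePlanner_spec : Claim_equal_poncePlanner := by
  intro l _
  show poncePlanner l = poncePlanner_alt l
  simp [poncePlanner, poncePlanner_alt, List.foldl_reverse, poncePlannerDict_eq_foldr]
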